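-- pv_equiv track=rewrite | github.com/flyersworder/analytics-env | scripts/pdf_conversion.py | _serialize_and_merge_rows
-- ===== SOURCE A (Python) =====
-- def _serialize_and_merge_rows(raw_table):
--     """Converts a raw table (list of lists) into a list of merged dictionaries."""
--     if not raw_table or len(raw_table) < 1:
--         return []
--
--     # Clean header and data rows
--     header = [
--         str(h).replace("\n", " ").strip() if h else f"column_{i+1}"
--         for i, h in enumerate(raw_table[0])
--     ]
--     data_rows = [
--         [
--             str(cell).replace("\n", " ").strip() if cell is not None else ""
--             for cell in row
--         ]
--         for row in raw_table[1:]
--     ]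
--
--     merged_rows = []
--     for row_list in data_rows:
--         if row_list[0]:  # A new parameter entry starts if the first cell is not empty.
--             merged_rows.append(dict(zip(header, row_list)))
--         elif merged_rows:  # Otherwise, it's a continuation of the previous parameter.
--             last_row_dict = merged_rows[-1]
--             continuation_dict = dict(zip(header, row_list))
--             for key, value in continuation_dict.items():
--                 if value:  # Only append if there's new information.
--                     last_row_dict[key] = (
--                         f"{last_row_dict.get(key, '')}\n{value}".strip()
--                     )
--     return merged_rows
-- ===== SOURCE B (Python) =====
-- def _is_continuation(row):
--     return not row[0]
--
--
-- def _drop_leading_continuations(rows):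
--     k = 0
--     while k < len(rows) and _is_continuation(rows[k]):
--         k += 1
--     return rows[k:]
--
--
-- def _group(rows):
--     """Partition rows into groups: each group is one entry row plus its continuations."""
--     groups = []
--     while rows:
--         head, rest = rows[0], rows[1:]
--         k = 0
--         while k < len(rest) and _is_continuation(rest[k]):
--             k += 1
--         groups.append([head] + rest[:k])
--         rows = rest[k:]
--     return groups
--
--
-- def _merge_group(header, group):
--     base = dict(zip(header, group[0]))
--     for cont in group[1:]:
--         for key, value in dict(zip(header, cont)).items():
--             if value:
--                 base[key] = f"{base.get(key, '')}\n{value}".strip()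
--     return base
--
--
-- def _serialize_and_merge_rows(raw_table):
--     """Two-phase: partition the data rows into groups, then merge each group."""
--     if not raw_table:
--         return []
--     header = [
--         str(h).replace("\n", " ").strip() if h else f"column_{i+1}"
--         for i, h in enumerate(raw_table[0])
--     ]
--     rows = [
--         [str(c).replace("\n", " ").strip() if c is not None else "" for c in row]
--         for row in raw_table[1:]
--     ]
--     groups = _group(_drop_leading_continuations(rows))
--     return [_merge_group(header, g) for g in groups]
-- ===== Notes on version B (the rewrite author's own statement) =====
-- stated objective: alternative
-- what changed: A's single stateful pass that appends to or mutates the last dict of merged_rows is replaced by a two-phase decomposition: first partition the cleaned data rows into groups (one entry row plus its trailing continuation rows, dropping leading continuations), then independently fold each group into its merged dict.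
import Mathlib
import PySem

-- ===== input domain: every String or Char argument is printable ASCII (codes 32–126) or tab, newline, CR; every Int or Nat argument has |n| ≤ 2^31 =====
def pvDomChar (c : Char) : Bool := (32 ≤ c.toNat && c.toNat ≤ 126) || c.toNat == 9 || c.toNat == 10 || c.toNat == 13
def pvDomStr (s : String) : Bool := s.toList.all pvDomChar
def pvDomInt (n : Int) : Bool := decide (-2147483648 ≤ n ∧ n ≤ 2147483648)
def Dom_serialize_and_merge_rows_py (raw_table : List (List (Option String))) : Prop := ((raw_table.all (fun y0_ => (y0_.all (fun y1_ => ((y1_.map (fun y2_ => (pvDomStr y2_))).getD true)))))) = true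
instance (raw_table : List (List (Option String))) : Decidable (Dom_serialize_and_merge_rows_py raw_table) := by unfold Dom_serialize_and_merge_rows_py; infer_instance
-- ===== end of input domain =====

-- B re-organises A's single accumulator pass into two phases (group the data rows, then merge
-- each group independently); same return value wherever A returns (Pre_ excludes only the
-- empty data rows on which both programs raise IndexError).

-- ===== PORT A =====
-- str(cell).replace("\n", " ").strip()
def pvCleanStr (s : String) : String :=
  PySem.Str.strip (PySem.Str.replace s "\n" " ")

-- one header cell: str(h).replace("\n"," ").strip() if h else f"column_{i+1}"
def pvHeaderCell (i : Int) (h : Option String) : String :=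
  match h with
  | some s => if s = "" then "column_" ++ PySem.Int.toStr (i + 1) else pvCleanStr s
  | none => "column_" ++ PySem.Int.toStr (i + 1)

-- the cleaned header list
def pvHeader (row : List (Option String)) : List String :=
  (PySem.List.enumerate row 0).map (fun p => pvHeaderCell p.1 p.2)

-- one cleaned data cell
def pvCleanCell (c : Option String) : String :=
  match c with
  | some s => pvCleanStr s
  | none => ""

-- dict(zip(header, row))
def pvMkDict (header : List String) (row : List String) : PySem.Dict String String :=
  PySem.Dict.ofList (header.zip row)

-- the continuation branch body: fold the continuation dict's items into the base dict
def pvMergeCont (header : List String) (base : PySem.Dict String String)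
    (row : List String) : PySem.Dict String String :=
  (pvMkDict header row).items.foldl
    (fun b kv =>
      if kv.2 ≠ "" then
        b.insert kv.1 (PySem.Str.strip (b.getD kv.1 "" ++ "\n" ++ kv.2))
      else b) base

-- A's single pass over data_rows, carrying merged_rows
def pvLoopA (header : List String) (merged : List (PySem.Dict String String)) :
    List (List String) → List (PySem.Dict String String)
  | [] => merged
  | row :: rest =>
    if (PySem.List.pyGet? row 0).getD "" ≠ "" then
      pvLoopA header (merged ++ [pvMkDict header row]) rest
    else if merged.isEmpty then
      pvLoopA header merged rest
    else
      pvLoopA header (merged.dropLast ++ [pvMergeCont header (merged.getLastD PySem.Dict.empty) row]) rest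

def serialize_and_merge_rows_py (raw_table : List (List (Option String))) : List (List (String × String)) :=
  match raw_table with
  | [] => []
  | hrow :: rest =>
    let header := pvHeader hrow
    let data_rows := rest.map (fun r => r.map pvCleanCell)
    (pvLoopA header [] data_rows).map PySem.Dict.items

-- ===== PORT B =====
-- not row[0]
def pvIsCont (row : List String) : Bool :=
  (PySem.List.pyGet? row 0).getD "" = ""

-- the inner while-scan of _drop_leading_continuations / _group: leading continuation rows
def pvTakeCont : List (List String) → List (List String)
  | [] => []
  | r :: rs => if pvIsCont r then r :: pvTakeCont rs else []

-- rows with the leading continuation rows removed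
def pvDropCont : List (List String) → List (List String)
  | [] => []
  | r :: rs => if pvIsCont r then pvDropCont rs else r :: rs

theorem pvDropCont_length_le : ∀ (rs : List (List String)), (pvDropCont rs).length ≤ rs.length
  | [] => le_refl _
  | r :: rs => by
    simp only [pvDropCont]
    split
    · exact le_trans (pvDropCont_length_le rs) (Nat.le_succ _)
    · exact le_refl _

-- _group: each group is one entry row plus its trailing continuation rows
def pvGroup : List (List String) → List (List (List String))
  | [] => []
  | r :: rest => ([r] ++ pvTakeCont rest) :: pvGroup (pvDropCont rest)
termination_by rs => rs.length
decreasing_by exact Nat.lt_succ_of_le (pvDropCont_length_le rest)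

-- _merge_group
def pvMergeGroup (header : List String) (group : List (List String)) : PySem.Dict String String :=
  match group with
  | [] => PySem.Dict.empty
  | base :: conts => conts.foldl (pvMergeCont header) (pvMkDict header base)

def serialize_and_merge_rows_py_alt (raw_table : List (List (Option String))) : List (List (String × String)) :=
  match raw_table with
  | [] => []
  | hrow :: rest =>
    let header := pvHeader hrow
    let rows := rest.map (fun r => r.map pvCleanCell)
    ((pvGroup (pvDropCont rows)).map (pvMergeGroup header)).map PySem.Dict.items

-- ===== PRECONDITION & SPEC =====
-- Pre_ excludes exactly the tables containing an empty data row: there A (row_list[0]) raises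
-- IndexError, and B raises IndexError there too.
def Pre_serialize_and_merge_rows_py (raw_table : List (List (Option String))) : Prop :=
  ∀ row ∈ raw_table.tail, row ≠ []
instance (raw_table : List (List (Option String))) : Decidable (Pre_serialize_and_merge_rows_py raw_table) := by unfold Pre_serialize_and_merge_rows_py; infer_instance

def pvWitness_serialize_and_merge_rows_py : List (List (Option String)) :=
  [[some "Name", some "Desc"], [some "x", some "a"], [none, some "b"]]

def Spec_serialize_and_merge_rows_py (raw_table : List (List (Option String))) (out : List (List (String × String))) : Prop := out = serialize_and_merge_rows_py_alt raw_table
instance (raw_table : List (List (Option String))) (out : List (List (String × String))) : Decidable (Spec_serialize_and_merge_rows_py raw_table out) := by unfold Spec_serialize_and_merge_rows_py; infer_instance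

-- ===== CLAIM (what is proved, stated in full; the proofs are below) =====
def Claim_equal_serialize_and_merge_rows_py : Prop := ∀ (raw_table : List (List (Option String))), Dom_serialize_and_merge_rows_py raw_table → Pre_serialize_and_merge_rows_py raw_table → Spec_serialize_and_merge_rows_py raw_table (serialize_and_merge_rows_py raw_table)

-- ===== LEMMAS AND PROOFS =====

theorem pvLoopA_push (header : List String) :
    ∀ (rows : List (List String)) (ms : List (PySem.Dict String String)) (m : PySem.Dict String String),
      pvLoopA header (ms ++ [m]) rows =
        ms ++ [(pvTakeCont rows).foldl (pvMergeCont header) m]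
           ++ (pvGroup (pvDropCont rows)).map (pvMergeGroup header)
  | [], ms, m => by simp [pvLoopA, pvTakeCont, pvDropCont, pvGroup]
  | r :: rest, ms, m => by
    by_cases h : (PySem.List.pyGet? r 0).getD "" = ""
    · have hc : pvIsCont r = true := by simp [pvIsCont, h]
      simp only [pvLoopA, h, ne_eq, not_true_eq_false, if_false]
      rw [if_neg (by simp)]
      rw [List.dropLast_concat, List.getLastD_concat]
      rw [pvLoopA_push header rest ms (pvMergeCont header m r)]
      simp [pvTakeCont, pvDropCont, hc]
    · have hc : pvIsCont r = false := by simp [pvIsCont, h]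
      simp only [pvLoopA, h, ne_eq, not_false_eq_true, if_true]
      rw [show (ms ++ [m]) ++ [pvMkDict header r] = ms ++ [m] ++ [pvMkDict header r] from rfl,
        pvLoopA_push header rest (ms ++ [m]) (pvMkDict header r)]
      simp [pvTakeCont, pvDropCont, pvGroup, pvMergeGroup, hc]

theorem pvLoopA_nil (header : List String) :
    ∀ (rows : List (List String)),
      pvLoopA header [] rows = (pvGroup (pvDropCont rows)).map (pvMergeGroup header)
  | [] => by simp [pvLoopA, pvDropCont, pvGroup]
  | r :: rest => by
    by_cases h : (PySem.List.pyGet? r 0).getD "" = ""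
    · have hc : pvIsCont r = true := by simp [pvIsCont, h]
      simp only [pvLoopA, h, ne_eq, not_true_eq_false, if_false, List.isEmpty_nil, if_true]
      rw [pvLoopA_nil header rest]
      simp [pvDropCont, hc]
    · have hc : pvIsCont r = false := by simp [pvIsCont, h]
      simp only [pvLoopA, h, ne_eq, not_false_eq_true, if_true, List.nil_append]
      rw [show [pvMkDict header r] = [] ++ [pvMkDict header r] from rfl,
        pvLoopA_push header rest [] (pvMkDict header r)]
      simp [pvDropCont, pvGroup, pvMergeGroup, hc]

-- ===== VERDICT (by name: the statement is the Claim_ definition above) =====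
theorem serialize_and_merge_rows_py_spec : Claim_equal_serialize_and_merge_rows_py := by
  intro raw_table _ _
  unfold Spec_serialize_and_merge_rows_py serialize_and_merge_rows_py serialize_and_merge_rows_py_alt
  match raw_table with
  | [] => rfl
  | hrow :: rest => simp only [pvLoopA_nil]
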